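-- pv_equiv track=rewrite | github.com/Kasl0/WDI | Cwiczenia 3 - zadania/16.py | czy_dokladnie_jeden
-- ===== SOURCE A (Python) =====
-- def czy_dokladnie_jeden(tab):
--     mini = min(tab)
--     maks = max(tab)
--     ile_mini = 0
--     ile_maks = 0
--     for i in range(len(tab)):
--         if tab[i] == maks:
--             ile_maks += 1
--         if tab[i] == mini:
--             ile_mini += 1
--     return ile_mini == 1 and ile_maks == 1
-- ===== SOURCE B (Python) =====
-- def czy_dokladnie_jeden(tab):
--     s = sorted(tab)
--     if len(s) == 1:
--         return True
--     return s[0] < s[1] and s[-2] < s[-1]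
-- ===== Notes on version B (the rewrite author's own statement) =====
-- stated objective: alternative
-- what changed: B sorts the list and decides by strict inequality at the two boundaries (s[0]<s[1] and s[-2]<s[-1]) instead of A's min/max passes followed by a counting loop; no occurrence counting at all.
import Mathlib
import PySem

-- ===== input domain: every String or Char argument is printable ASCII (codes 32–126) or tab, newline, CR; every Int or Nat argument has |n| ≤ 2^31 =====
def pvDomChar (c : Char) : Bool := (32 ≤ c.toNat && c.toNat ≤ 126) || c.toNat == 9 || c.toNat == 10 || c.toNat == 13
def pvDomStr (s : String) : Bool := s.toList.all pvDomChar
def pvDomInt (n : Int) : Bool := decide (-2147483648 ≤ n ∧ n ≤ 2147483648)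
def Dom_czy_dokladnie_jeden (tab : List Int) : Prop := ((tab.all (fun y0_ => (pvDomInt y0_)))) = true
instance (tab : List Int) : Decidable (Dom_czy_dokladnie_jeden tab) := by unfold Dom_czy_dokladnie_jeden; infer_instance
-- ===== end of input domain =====

-- B sorts the list and decides by strict inequality at the two boundaries (s[0] < s[1],
-- s[-2] < s[-1]), with no occurrence counting; A runs min and max passes plus an index
-- loop with two parallel occurrence counters.  Objective: alternative (different algorithm).

-- ===== PORT A =====
def czy_dokladnie_jeden (tab : List Int) : Bool :=
  match PySem.List.min? tab (fun x => x), PySem.List.max? tab (fun x => x) with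
  | some mini, some maks =>
    let p := (PySem.List.pyRange 0 (tab.length : Int) 1).foldl
      (fun (s : Int × Int) i =>
        (fun (v : Int) =>
          let s1 := if v = maks then (s.1, s.2 + 1) else s
          if v = mini then (s1.1 + 1, s1.2) else s1) (PySem.List.pyGetD tab i 0))
      (0, 0)
    decide (p.1 = 1) && decide (p.2 = 1)
  | _, _ => false

-- ===== PORT B =====
def czy_dokladnie_jeden_alt (tab : List Int) : Bool :=
  let s := PySem.List.sorted tab (fun x : Int => x) false
  if s.length = 1 then true
  else
    (((PySem.List.pyGet? s 0).bind fun a =>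
      (PySem.List.pyGet? s 1).bind fun b =>
      (PySem.List.pyGet? s (-2)).bind fun c =>
      (PySem.List.pyGet? s (-1)).map fun d =>
        decide (a < b) && decide (c < d)) : Option Bool).getD false

-- ===== PRECONDITION & SPEC =====
-- Pre_ excludes only the empty list, on which A (min of an empty sequence) raises ValueError.
def Pre_czy_dokladnie_jeden (tab : List Int) : Prop := tab ≠ []
instance (tab : List Int) : Decidable (Pre_czy_dokladnie_jeden tab) := by unfold Pre_czy_dokladnie_jeden; infer_instance
def pvWitness_czy_dokladnie_jeden : List Int := [1, 2]
def Spec_czy_dokladnie_jeden (tab : List Int) (out : Bool) : Prop := out = czy_dokladnie_jeden_alt tab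
instance (tab : List Int) (out : Bool) : Decidable (Spec_czy_dokladnie_jeden tab out) := by unfold Spec_czy_dokladnie_jeden; infer_instance

-- ===== CLAIM (what is proved, stated in full; the proofs are below) =====
def Claim_equal_czy_dokladnie_jeden : Prop := ∀ (tab : List Int), Dom_czy_dokladnie_jeden tab → Pre_czy_dokladnie_jeden tab → Spec_czy_dokladnie_jeden tab (czy_dokladnie_jeden tab)

-- ===== LEMMAS AND PROOFS =====

-- A's counting loop returns (count mini, count maks) on top of the accumulator.
theorem countLoop (tab : List Int) (mini maks : Int) (a b : Int) :
    tab.foldl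
      (fun (s : Int × Int) v =>
        if v = mini then
          ((if v = maks then (s.1, s.2 + 1) else s).1 + 1,
            (if v = maks then (s.1, s.2 + 1) else s).2)
        else if v = maks then (s.1, s.2 + 1) else s) (a, b)
      = (a + tab.count mini, b + tab.count maks) := by
  induction tab generalizing a b with
  | nil => simp
  | cons x t ih =>
    by_cases hx : x = maks <;> by_cases hm : x = mini <;>
      simp_all [Prod.ext_iff] <;> omega

-- In a ≤-sorted list a :: b :: t, the head occurs exactly once iff a < b.
theorem count_head_sorted (a b : Int) (t : List Int)
    (h : (a :: b :: t).Pairwise (· ≤ ·)) :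
    ((a :: b :: t).count a = 1) ↔ a < b := by
  rcases List.pairwise_cons.1 h with ⟨hall, h2⟩
  rcases List.pairwise_cons.1 h2 with ⟨hbt, _⟩
  constructor
  · intro hc
    rcases lt_or_eq_of_le (hall b (by simp)) with hlt | heq
    · exact hlt
    · exfalso
      have : 2 ≤ (a :: b :: t).count a := by
        simp [heq]
      omega
  · intro hlt
    have hnot : a ∉ b :: t := by
      intro hmem
      rcases List.mem_cons.1 hmem with heq | hmem'
      · omega
      · exact absurd (hbt a hmem') (by omega)
    simp [List.count_eq_zero.2 hnot]

-- Mirror: in a ≥-sorted (reversed) list c :: d :: u, head occurs once iff d < c.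
theorem count_head_sorted_ge (c d : Int) (u : List Int)
    (h : (c :: d :: u).Pairwise (fun x y => y ≤ x)) :
    ((c :: d :: u).count c = 1) ↔ d < c := by
  rcases List.pairwise_cons.1 h with ⟨hall, h2⟩
  rcases List.pairwise_cons.1 h2 with ⟨hdu, _⟩
  constructor
  · intro hc
    rcases lt_or_eq_of_le (hall d (by simp)) with hlt | heq
    · exact hlt
    · exfalso
      have : 2 ≤ (c :: d :: u).count c := by
        simp [heq]
      omega
  · intro hlt
    have hnot : c ∉ d :: u := by
      intro hmem
      rcases List.mem_cons.1 hmem with heq | hmem'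
      · omega
      · exact absurd (hdu c hmem') (by omega)
    simp [List.count_eq_zero.2 hnot]

-- ===== VERDICT (by name: the statement is the Claim_ definition above) =====
theorem czy_dokladnie_jeden_spec : Claim_equal_czy_dokladnie_jeden := by
  intro tab _ hpre
  unfold Spec_czy_dokladnie_jeden czy_dokladnie_jeden czy_dokladnie_jeden_alt
  cases hmn : PySem.List.min? tab (fun x => x) with
  | none => exact absurd ((PySem.List.min?_eq_none_iff tab (fun x => x)).1 hmn) hpre
  | some mn =>
  cases hmx : PySem.List.max? tab (fun x => x) with
  | none => exact absurd ((PySem.List.max?_eq_none_iff tab (fun x => x)).1 hmx) hpre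
  | some mx =>
  dsimp only
  rw [PySem.List.foldl_pyRange_zero_pyGetD' tab 0
    (fun (s : Int × Int) v =>
        if v = mn then
          ((if v = mx then (s.1, s.2 + 1) else s).1 + 1,
            (if v = mx then (s.1, s.2 + 1) else s).2)
        else if v = mx then (s.1, s.2 + 1) else s) (0, 0)]
  rw [countLoop]
  -- A's result is now:  count mn = 1 && count mx = 1
  have hperm : (PySem.List.sorted tab (fun x : Int => x) false).Perm tab :=
    PySem.List.sorted_perm tab (fun x : Int => x) false
  have hpair : (PySem.List.sorted tab (fun x : Int => x) false).Pairwise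
      (fun x y : Int => x ≤ y) := PySem.List.sorted_pairwise tab (fun x : Int => x)
  set s := PySem.List.sorted tab (fun x : Int => x) false with hs
  match hsl : s with
  | [] =>
    exact absurd hperm.symm.eq_nil hpre
  | [a] =>
    have htab : tab = [a] := List.perm_singleton.mp hperm.symm
    subst htab
    simp [PySem.List.min?, PySem.List.max?] at hmn hmx
    simp [← hmn, ← hmx]
  | a :: b :: t =>
    -- mn is the head, mx is the head of the reverse
    have hmn_mem : mn ∈ tab := PySem.List.min?_mem hmn
    have hmx_mem : mx ∈ tab := PySem.List.max?_mem hmx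
    have ha_mem : a ∈ tab := hperm.mem_iff.1 (by simp)
    have hmn_eq : mn = a := by
      have h1 : a ≤ mn := by
        rcases List.pairwise_cons.1 hpair with ⟨hall, _⟩
        rcases List.mem_cons.1 (hperm.mem_iff.2 hmn_mem) with h | h
        · omega
        · exact hall _ h
      have h2 : mn ≤ a := PySem.List.min?_isMin hmn a ha_mem
      omega
    -- reverse view for the max end
    obtain ⟨c, d, u, hrev⟩ : ∃ c d u, (a :: b :: t).reverse = c :: d :: u := by
      rcases hr : (a :: b :: t).reverse with _ | ⟨c, rest⟩
      · exact absurd (List.reverse_eq_nil_iff.mp hr) (by simp)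
      · rcases hrest : rest with _ | ⟨d, u⟩
        · subst hrest
          have := congrArg List.length hr
          simp at this
        · subst hrest
          exact ⟨c, d, u, rfl⟩
    have hpair_rev : (c :: d :: u).Pairwise (fun x y : Int => y ≤ x) := by
      rw [← hrev]; exact (List.pairwise_reverse).2 hpair
    have hc_mem : c ∈ tab := by
      have hcrev : c ∈ (a :: b :: t).reverse := by rw [hrev]; simp
      exact hperm.mem_iff.1 (List.mem_reverse.1 hcrev)
    have hmx_eq : mx = c := by
      have h1 : mx ≤ c := by
        rcases List.pairwise_cons.1 hpair_rev with ⟨hall, _⟩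
        have hmem : mx ∈ (a :: b :: t).reverse :=
          List.mem_reverse.2 (hperm.mem_iff.2 hmx_mem)
        rw [hrev] at hmem
        rcases List.mem_cons.1 hmem with h | h
        · omega
        · exact hall _ h
      have h2 : c ≤ mx := PySem.List.max?_isMax hmx c hc_mem
      omega
    -- counts transported to the sorted list / its reverse
    have hcmn : tab.count mn = (a :: b :: t).count a := by
      rw [hmn_eq]; exact (hperm.count_eq a).symm
    have hcmx : tab.count mx = (c :: d :: u).count c := by
      rw [hmx_eq, ← hperm.count_eq c, ← List.count_reverse (l := a :: b :: t), hrev]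
    -- the sorted list ends in [d, c]
    have hlist : a :: b :: t = u.reverse ++ [d, c] := by
      have h := congrArg List.reverse hrev
      simpa using h
    -- evaluate B's branch
    have hlen : ¬ ((a :: b :: t).length = 1) := by simp
    have hneg1 : PySem.List.pyGet? (a :: b :: t) (-1) = some c := by
      rw [hlist]
      have : u.reverse ++ [d, c] = (u.reverse ++ [d]) ++ [c] := by simp
      rw [this, PySem.List.pyGet?_neg_one_append_singleton]
    have hneg2 : PySem.List.pyGet? (a :: b :: t) (-2) = some d := by
      rw [hlist, PySem.List.pyGet?_neg_ofNat (u.reverse ++ [d, c]) 2 (by omega) (by simp)]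
      rw [List.getElem?_append_right (by simp)]
      simp
    have hget1 : PySem.List.pyGet? (a :: b :: t) 1 = some b := by
      simp [PySem.List.pyGet?, PySem.List.pyIdx?]
    have hiff1 := count_head_sorted a b t hpair
    have hiff2 := count_head_sorted_ge c d u hpair_rev
    simp only [if_neg hlen, PySem.List.pyGet?_zero_cons, hget1, hneg2, hneg1,
      zero_add, hcmn, hcmx]
    congr 1 <;> apply decide_eq_decide.mpr
    · rw [← hiff1]; constructor <;> intro h <;> omega
    · rw [← hiff2]; constructor <;> intro h <;> omega
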